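-- pv_equiv track=rewrite | github.com/cmalili/mastering_robotics | maze/bfs.py | compress_moves
-- ===== SOURCE A (Python) =====
-- from typing import Dict, List, Tuple
--
-- def compress_moves(path: List[Tuple[int,int]]) -> List[str]:
--     """Run-length encode U/D/L/R steps."""
--     if len(path) < 2: return []
--     def step(a,b):
--         (y1,x1),(y2,x2)=a,b
--         if y2==y1-1 and x2==x1: return "U"
--         if y2==y1+1 and x2==x1: return "D"
--         if x2==x1-1 and y2==y1: return "L"
--         if x2==x1+1 and y2==y1: return "R"
--         return "?"
--     moves=[step(path[i], path[i+1]) for i in range(len(path)-1)]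
--     comp=[]; cur=moves[0]; cnt=1
--     for m in moves[1:]:
--         if m==cur: cnt+=1
--         else: comp.append(f"{cur}{cnt}"); cur=m; cnt=1
--     comp.append(f"{cur}{cnt}")
--     return comp
-- ===== SOURCE B (Python) =====
-- def compress_moves(path):
--     """Run-length encode U/D/L/R steps by two-pointer run skipping over indices
--     (no intermediate moves list, no cur/cnt state machine)."""
--     def step(a, b):
--         (y1, x1), (y2, x2) = a, b
--         if y2 == y1 - 1 and x2 == x1: return "U"
--         if y2 == y1 + 1 and x2 == x1: return "D"
--         if x2 == x1 - 1 and y2 == y1: return "L"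
--         if x2 == x1 + 1 and y2 == y1: return "R"
--         return "?"
--     out = []
--     i, n = 0, len(path)
--     while i + 1 < n:
--         m = step(path[i], path[i + 1])
--         j = i + 1
--         while j + 1 < n and step(path[j], path[j + 1]) == m:
--             j += 1
--         out.append(f"{m}{j - i}")
--         i = j
--     return out
-- ===== Notes on version B (the rewrite author's own statement) =====
-- stated objective: alternative
-- what changed: B replaces A's staged moves-list + RLE accumulator state machine by a two-pointer scan over indices: an outer loop takes the step at the current run start and an inner pointer skips ahead to the run's end, emitting f'{m}{j-i}' per run; the len<2 guard disappears naturally.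
import Mathlib
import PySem

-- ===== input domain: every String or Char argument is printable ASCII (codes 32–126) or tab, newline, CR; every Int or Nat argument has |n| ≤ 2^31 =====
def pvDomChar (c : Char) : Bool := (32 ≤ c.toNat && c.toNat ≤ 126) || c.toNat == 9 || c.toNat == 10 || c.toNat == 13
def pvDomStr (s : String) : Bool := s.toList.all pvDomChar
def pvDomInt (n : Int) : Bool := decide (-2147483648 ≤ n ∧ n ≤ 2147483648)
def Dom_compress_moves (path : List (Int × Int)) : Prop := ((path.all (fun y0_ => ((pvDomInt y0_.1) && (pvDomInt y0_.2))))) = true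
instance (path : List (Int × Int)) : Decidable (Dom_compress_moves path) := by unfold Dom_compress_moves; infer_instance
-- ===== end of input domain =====

-- B replaces A's moves-list + RLE state machine by a two-pointer run-skipping scan over
-- indices; same return value, no speed claim (objective: alternative).

-- ===== PORT A =====
-- step(a,b): shared helper of both Pythons (B defines the identical helper)
def pvStep (a b : Int × Int) : String :=
  let (y1, x1) := a
  let (y2, x2) := b
  if y2 == y1 - 1 && x2 == x1 then "U"
  else if y2 == y1 + 1 && x2 == x1 then "D"
  else if x2 == x1 - 1 && y2 == y1 then "L"
  else if x2 == x1 + 1 && y2 == y1 then "R"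
  else "?"

def compress_moves (path : List (Int × Int)) : List String :=
  if path.length < 2 then [] else
  let moves := (PySem.List.pyRange 0 ((path.length : Int) - 1) 1).map
    (fun i => pvStep (PySem.List.pyGetD path i (0, 0)) (PySem.List.pyGetD path (i + 1) (0, 0)))
  match moves with
  | [] => []  -- unreachable under the guard (moves[0] would raise only here)
  | m0 :: rest =>
    let s := rest.foldl
      (fun (s : List String × String × Int) m =>
        if m == s.2.1 then (s.1, s.2.1, s.2.2 + 1)
        else (s.1 ++ [s.2.1 ++ PySem.Int.toStr s.2.2], m, 1)) ([], m0, 1)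
    s.1 ++ [s.2.1 ++ PySem.Int.toStr s.2.2]

-- ===== PORT B =====
-- inner while loop: advance j while the next step still equals m
def pvInnerB (path : List (Int × Int)) (m : String) (j : Nat) : Nat :=
  if _h : j + 1 < path.length then
    if pvStep (PySem.List.pyGetD path (j : Int) (0, 0)) (PySem.List.pyGetD path ((j : Int) + 1) (0, 0)) == m
    then pvInnerB path m (j + 1) else j
  else j
termination_by path.length - j

-- the outer loop needs this to terminate (j strictly advances past i)
lemma pvInnerB_ge (path : List (Int × Int)) (m : String) (j : Nat) : j ≤ pvInnerB path m j := by
  induction j using pvInnerB.induct path m with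
  | case1 j h hb ih => rw [pvInnerB]; simp only [dif_pos h, if_pos hb]; omega
  | case2 j h hb => rw [pvInnerB]; simp only [dif_pos h, if_neg hb]; omega
  | case3 j h => rw [pvInnerB]; simp only [dif_neg h]; omega

-- outer while loop over the run-start index i
def pvOuterB (path : List (Int × Int)) (i : Nat) (out : List String) : List String :=
  if _h : i + 1 < path.length then
    let m := pvStep (PySem.List.pyGetD path (i : Int) (0, 0)) (PySem.List.pyGetD path ((i : Int) + 1) (0, 0))
    let j := pvInnerB path m (i + 1)
    pvOuterB path j (out ++ [m ++ PySem.Int.toStr ((j : Int) - (i : Int))])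
  else out
termination_by path.length - i
decreasing_by
  have := pvInnerB_ge path (pvStep (PySem.List.pyGetD path (i : Int) (0, 0)) (PySem.List.pyGetD path ((i : Int) + 1) (0, 0))) (i + 1)
  omega

def compress_moves_alt (path : List (Int × Int)) : List String :=
  pvOuterB path 0 []

-- ===== PRECONDITION & SPEC =====
def Spec_compress_moves (path : List (Int × Int)) (out : List String) : Prop := out = compress_moves_alt path
instance (path : List (Int × Int)) (out : List String) : Decidable (Spec_compress_moves path out) := by unfold Spec_compress_moves; infer_instance

-- ===== CLAIM (what is proved, stated in full; the proofs are below) =====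
def Claim_equal_compress_moves : Prop := ∀ (path : List (Int × Int)), Dom_compress_moves path → Spec_compress_moves path (compress_moves path)

-- ===== LEMMAS AND PROOFS =====

-- the list of step characters between consecutive points (proof-side abbreviation)
def pvMs (path : List (Int × Int)) : List String :=
  (path.zip (path.drop 1)).map (fun p => pvStep p.1 p.2)

-- canonical run-length encoding (proof-side reference both ports are reduced to)
def pvRle : List String → List String
  | [] => []
  | m :: rest =>
    (m ++ PySem.Int.toStr (1 + ((rest.takeWhile (· == m)).length : Int)))
      :: pvRle (rest.dropWhile (· == m))
termination_by l => l.length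
decreasing_by
  have := List.length_dropWhile_le (p := (· == m)) (l := rest)
  simp only [List.length_cons]; omega

lemma pvMs_length (path : List (Int × Int)) (h : 1 ≤ path.length) :
    (pvMs path).length = path.length - 1 := by
  simp only [pvMs, List.length_map, List.length_zip, List.length_drop]; omega

lemma pvMs_getElem (path : List (Int × Int)) (k : Nat) (hk : k < (pvMs path).length) :
    (pvMs path)[k] = pvStep (path.getD k (0, 0)) (path.getD (k + 1) (0, 0)) := by
  have h1 : k < path.length := by
    simp [pvMs] at hk; omega
  have h2 : k + 1 < path.length := by simp [pvMs] at hk; omega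
  simp only [pvMs, List.getElem_map, List.getElem_zip, List.getElem_drop]
  rw [List.getD_eq_getElem _ _ h1, List.getD_eq_getElem _ _ h2]
  congr 2 <;> omega

lemma drop_takeWhile_length {α : Type} (p : α → Bool) (l : List α) :
    l.drop (l.takeWhile p).length = l.dropWhile p := by
  induction l with
  | nil => rfl
  | cons a t ih =>
    by_cases h : p a
    · simp [List.takeWhile_cons, List.dropWhile_cons, h, ih]
    · simp [List.takeWhile_cons, List.dropWhile_cons, h]

-- A's index comprehension equals pvMs.
lemma movesA_eq (path : List (Int × Int)) :
    (PySem.List.pyRange 0 ((path.length : Int) - 1) 1).map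
      (fun i => pvStep (PySem.List.pyGetD path i (0, 0)) (PySem.List.pyGetD path (i + 1) (0, 0)))
    = pvMs path := by
  apply List.ext_getElem
  · simp [PySem.List.length_pyRange_one, pvMs]
  · intro k h1 h2
    have hk : k < path.length - 1 := by
      simpa [PySem.List.length_pyRange_one] using h1
    simp only [List.getElem_map, PySem.List.getElem_pyRange_one, zero_add]
    have e1 : ((k : Int)) + 1 = ((k + 1 : Nat) : Int) := by push_cast; ring
    rw [e1, PySem.List.pyGetD_natCast, PySem.List.pyGetD_natCast, pvMs_getElem path k h2]

-- A's fold over the tail plus the final flush equals the canonical RLE continuation.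
lemma foldA_eq (ms : List String) : ∀ (out : List String) (cur : String) (cnt : Int),
    (let s := ms.foldl
      (fun (s : List String × String × Int) m =>
        if m == s.2.1 then (s.1, s.2.1, s.2.2 + 1)
        else (s.1 ++ [s.2.1 ++ PySem.Int.toStr s.2.2], m, 1)) (out, cur, cnt)
     s.1 ++ [s.2.1 ++ PySem.Int.toStr s.2.2])
    = out ++ (cur ++ PySem.Int.toStr (cnt + ((ms.takeWhile (· == cur)).length : Int)))
        :: pvRle (ms.dropWhile (· == cur)) := by
  induction ms with
  | nil => intro out cur cnt; simp [pvRle]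
  | cons m rest ih =>
    intro out cur cnt
    simp only [List.foldl_cons]
    by_cases h : m = cur
    · subst h
      rw [if_pos (by simp)]
      rw [ih out m (cnt + 1)]
      have e : cnt + (((rest.takeWhile (· == m)).length + 1 : Nat) : Int)
          = cnt + 1 + (((rest.takeWhile (· == m)).length : Nat) : Int) := by push_cast; ring
      rw [List.takeWhile_cons_of_pos (by simp), List.dropWhile_cons_of_pos (by simp),
        List.length_cons, e]
    · rw [if_neg (by simpa using h)]
      rw [ih (out ++ [cur ++ PySem.Int.toStr cnt]) m 1]
      have hb : (m == cur) = false := by simpa using h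
      simp [List.takeWhile_cons, List.dropWhile_cons, hb, pvRle]

-- A equals the canonical RLE of pvMs.
lemma compress_moves_eq_rle (path : List (Int × Int)) :
    compress_moves path = pvRle (pvMs path) := by
  unfold compress_moves
  by_cases h : path.length < 2
  · rw [if_pos h]
    match path, h with
    | [], _ => simp [pvMs, pvRle]
    | [p], _ => simp [pvMs, pvRle]
  · rw [if_neg h]
    rw [movesA_eq]
    have hne : pvMs path ≠ [] := by
      have := pvMs_length path (by omega)
      intro hz; rw [hz] at this; simp at this; omega
    obtain ⟨m0, rest, hp⟩ := List.exists_cons_of_ne_nil hne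
    rw [hp]
    simp only [foldA_eq rest [] m0 1, pvRle, List.nil_append]

-- the inner pointer lands exactly past the run of m in pvMs.
lemma pvInnerB_eq (path : List (Int × Int)) (m : String) (j : Nat) :
    pvInnerB path m j = j + (((pvMs path).drop j).takeWhile (· == m)).length := by
  induction j using pvInnerB.induct path m with
  | case1 j h hb ih =>
    have hj : j < (pvMs path).length := by rw [pvMs_length path (by omega)]; omega
    have hd : (pvMs path).drop j = (pvMs path)[j] :: (pvMs path).drop (j + 1) :=
      List.drop_eq_getElem_cons hj
    have hms : (pvMs path)[j] = pvStep (path.getD j (0, 0)) (path.getD (j + 1) (0, 0)) :=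
      pvMs_getElem path j hj
    have e1 : ((j : Int)) + 1 = ((j + 1 : Nat) : Int) := by push_cast; ring
    have hstep : pvStep (PySem.List.pyGetD path (j : Int) (0, 0))
        (PySem.List.pyGetD path ((j : Int) + 1) (0, 0)) = (pvMs path)[j] := by
      rw [hms, PySem.List.pyGetD_natCast, e1, PySem.List.pyGetD_natCast]
    rw [hstep] at hb
    rw [pvInnerB]
    simp only [dif_pos h]
    rw [hstep, if_pos hb, ih, hd]
    simp only [List.takeWhile_cons, hb, if_true, List.length_cons]
    omega
  | case2 j h hb =>
    have hj : j < (pvMs path).length := by rw [pvMs_length path (by omega)]; omega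
    have hd : (pvMs path).drop j = (pvMs path)[j] :: (pvMs path).drop (j + 1) :=
      List.drop_eq_getElem_cons hj
    have hms : (pvMs path)[j] = pvStep (path.getD j (0, 0)) (path.getD (j + 1) (0, 0)) :=
      pvMs_getElem path j hj
    have e1 : ((j : Int)) + 1 = ((j + 1 : Nat) : Int) := by push_cast; ring
    have hstep : pvStep (PySem.List.pyGetD path (j : Int) (0, 0))
        (PySem.List.pyGetD path ((j : Int) + 1) (0, 0)) = (pvMs path)[j] := by
      rw [hms, PySem.List.pyGetD_natCast, e1, PySem.List.pyGetD_natCast]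
    rw [hstep] at hb
    have hbf : ((pvMs path)[j] == m) = false := by simpa using hb
    rw [pvInnerB]
    simp only [dif_pos h]
    rw [hstep, if_neg hb, hd]
    simp only [List.takeWhile_cons, hbf, Bool.false_eq_true, if_false, List.length_nil]
    omega
  | case3 j h =>
    have : (pvMs path).drop j = [] := by
      apply List.drop_eq_nil_of_le
      by_cases h1 : 1 ≤ path.length
      · rw [pvMs_length path h1]; omega
      · have : path.length = 0 := by omega
        simp [pvMs, this, List.length_eq_zero_iff.mp this]
    rw [pvInnerB]
    simp [h, this]

-- the outer loop produces the canonical RLE starting at pair index i.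
lemma pvOuterB_eq (path : List (Int × Int)) : ∀ (i : Nat) (out : List String),
    pvOuterB path i out = out ++ pvRle ((pvMs path).drop i) := by
  intro i out
  induction i, out using pvOuterB.induct path with
  | case1 i out h m j ih =>
    have hi : i < (pvMs path).length := by rw [pvMs_length path (by omega)]; omega
    have hd : (pvMs path).drop i = (pvMs path)[i] :: (pvMs path).drop (i + 1) :=
      List.drop_eq_getElem_cons hi
    have hms : (pvMs path)[i] = pvStep (path.getD i (0, 0)) (path.getD (i + 1) (0, 0)) :=
      pvMs_getElem path i hi
    have e1 : ((i : Int)) + 1 = ((i + 1 : Nat) : Int) := by push_cast; ring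
    have hmdef : m = pvStep (PySem.List.pyGetD path (i : Int) (0, 0))
        (PySem.List.pyGetD path ((i : Int) + 1) (0, 0)) := rfl
    have hm' : m = (pvMs path)[i] := by
      rw [hmdef, PySem.List.pyGetD_natCast, e1, PySem.List.pyGetD_natCast, hms]
    have hjv : j = i + 1 + (((pvMs path).drop (i + 1)).takeWhile (· == m)).length :=
      pvInnerB_eq path m (i + 1)
    have hdropj : (pvMs path).drop j = ((pvMs path).drop (i + 1)).dropWhile (· == m) := by
      rw [hjv, ← List.drop_drop, drop_takeWhile_length]
    have hstep : pvOuterB path i out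
        = pvOuterB path j (out ++ [m ++ PySem.Int.toStr ((j : Int) - (i : Int))]) := by
      rw [pvOuterB]; simp only [dif_pos h]; rfl
    have hcnt : ((j : Int) - (i : Int))
        = 1 + ((((pvMs path).drop (i + 1)).takeWhile (· == m)).length : Int) := by
      rw [hjv]; push_cast; ring
    rw [hstep, ih, hcnt, hd]
    simp only [pvRle, ← hm', hdropj, List.append_assoc, List.singleton_append]
  | case2 i out h =>
    have : (pvMs path).drop i = [] := by
      apply List.drop_eq_nil_of_le
      by_cases h1 : 1 ≤ path.length
      · rw [pvMs_length path h1]; omega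
      · have h0 : path.length = 0 := by omega
        simp [pvMs, List.length_eq_zero_iff.mp h0]
    rw [pvOuterB]
    simp [h, this, pvRle]

-- ===== VERDICT (by name: the statement is the Claim_ definition above) =====
theorem compress_moves_spec : Claim_equal_compress_moves := by
  intro path _
  unfold Spec_compress_moves compress_moves_alt
  rw [pvOuterB_eq path 0 [], List.drop_zero, List.nil_append, compress_moves_eq_rle]
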